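-- pv_equiv track=rewrite | github.com/pediapress/mwlib | src/mwlib/rl/rlwriter.py | _getFrags
-- ===== SOURCE A (Python) =====
-- def _getFrags(txt):
--     # Words = re.findall('([ \t]+|[^ \t]+)', txt)
--     words = []
--     word = []
--     in_tag = False
--     in_space = False
--     for c in txt:
--         if c == "<":
--             in_tag = True
--         if c in [" ", "\t"]:
--             if not in_tag and not in_space:
--                 words.append("".join(word))
--                 word = []
--             word.append(c)
--             in_space = True
--         else:
--             if in_space and not in_tag:
--                 words.append("".join(word))
--                 word = []
--             word.append(c)
--             in_space = False
--         if c == ">":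
--             in_tag = False
--     if word:
--         words.append("".join(word))
--     return words
-- ===== SOURCE B (Python) =====
-- def _getFrags(txt):
--     # boundary-slicing rewrite: one scan records split indices, then the
--     # string is sliced at those boundaries (no char accumulation / join)
--     if not txt:
--         return []
--     cuts = [0]
--     in_tag = False
--     prev_space = False
--     for i, c in enumerate(txt):
--         if c == "<":
--             in_tag = True
--         sp = c in " \t"
--         if not in_tag and sp != prev_space:
--             cuts.append(i)
--         prev_space = sp
--         if c == ">":
--             in_tag = False
--     cuts.append(len(txt))
--     return [txt[a:b] for a, b in zip(cuts, cuts[1:])]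
-- ===== Notes on version B (the rewrite author's own statement) =====
-- stated objective: alternative
-- what changed: Instead of accumulating characters into a word buffer and joining it at every split, B scans once recording boundary indices (merging A's two symmetric split tests into one transition test) and then produces the fragments by slicing the original string between consecutive boundaries.
import Mathlib
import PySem

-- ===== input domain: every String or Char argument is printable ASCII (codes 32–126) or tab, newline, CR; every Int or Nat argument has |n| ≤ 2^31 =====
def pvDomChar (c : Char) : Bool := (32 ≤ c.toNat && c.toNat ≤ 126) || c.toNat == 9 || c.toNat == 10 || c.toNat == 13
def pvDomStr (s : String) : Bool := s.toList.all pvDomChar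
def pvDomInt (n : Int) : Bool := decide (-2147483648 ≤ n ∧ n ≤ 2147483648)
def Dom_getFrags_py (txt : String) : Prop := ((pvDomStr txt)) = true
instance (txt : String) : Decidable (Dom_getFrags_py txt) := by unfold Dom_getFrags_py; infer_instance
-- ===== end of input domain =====

-- B replaces A's character-accumulate-and-join loop by a boundary scan that records split
-- indices once and then slices the original string between consecutive boundaries
-- (objective: alternative decomposition, same linear cost).

-- ===== PORT A =====
-- one loop iteration of A: state = (words, word, in_tag, in_space)
def stepA (st : List String × List Char × Bool × Bool) (c : Char) :
    List String × List Char × Bool × Bool :=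
  match st with
  | (words, word, inTag, inSpace) =>
    let inTag := if c == '<' then true else inTag
    let (words, word, inSpace) :=
      if c == ' ' || c == '\t' then
        let (words, word) :=
          if !inTag && !inSpace then (words ++ [String.ofList word], ([] : List Char))
          else (words, word)
        (words, word ++ [c], true)
      else
        let (words, word) :=
          if inSpace && !inTag then (words ++ [String.ofList word], ([] : List Char))
          else (words, word)
        (words, word ++ [c], false)
    let inTag := if c == '>' then false else inTag
    (words, word, inTag, inSpace)

def getFrags_py (txt : String) : List String :=
  let r := txt.toList.foldl stepA ([], [], false, false)
  if r.2.1 ≠ [] then r.1 ++ [String.ofList r.2.1] else r.1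

-- ===== PORT B =====
-- one loop iteration of B: state = (cuts, in_tag, prev_space)
def stepB (st : List Int × Bool × Bool) (ic : Int × Char) : List Int × Bool × Bool :=
  match st, ic with
  | (cuts, inTag, prev), (i, c) =>
    let inTag := if c == '<' then true else inTag
    let sp := c == ' ' || c == '\t'
    let cuts := if !inTag && sp != prev then cuts ++ [i] else cuts
    let inTag := if c == '>' then false else inTag
    (cuts, inTag, sp)

def getFrags_py_alt (txt : String) : List String :=
  if txt.toList.isEmpty then []
  else
    let r := (PySem.List.enumerate txt.toList 0).foldl stepB ([0], false, false)
    let cuts := r.1 ++ [(txt.toList.length : Int)]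
    (cuts.zip (cuts.drop 1)).map (fun ab => PySem.Str.slice txt (some ab.1) (some ab.2))

-- ===== PRECONDITION & SPEC =====
def Spec_getFrags_py (txt : String) (out : List String) : Prop := out = getFrags_py_alt txt
instance (txt : String) (out : List String) : Decidable (Spec_getFrags_py txt out) := by unfold Spec_getFrags_py; infer_instance

-- ===== CLAIM (what is proved, stated in full; the proofs are below) =====
def Claim_equal_getFrags_py : Prop := ∀ (txt : String), Dom_getFrags_py txt → Spec_getFrags_py txt (getFrags_py txt)

-- ===== LEMMAS AND PROOFS =====

-- fragments of `full` between consecutive boundaries (proof-side characterisation)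
def fragsN (full : List Char) : List Nat → List String
  | a :: b :: t => String.ofList ((full.drop a).take (b - a)) :: fragsN full (b :: t)
  | _ => []

-- A's finishing step
def finishA (r : List String × List Char × Bool × Bool) : List String :=
  if r.2.1 ≠ [] then r.1 ++ [String.ofList r.2.1] else r.1

theorem fragsN_append (full : List Char) (ns : List Nat) (l b : Nat) :
    fragsN full ((ns ++ [l]) ++ [b]) =
      fragsN full (ns ++ [l]) ++ [String.ofList ((full.drop l).take (b - l))] := by
  induction ns with
  | nil => simp [fragsN]
  | cons x t ih =>
    cases t with
    | nil => simp [fragsN]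
    | cons y u => simpa [fragsN] using ih

-- B's zip/slice expression computes fragsN
theorem zip_slice_eq_fragsN (txt : String) (ns : List Nat) :
    (((ns.map (Nat.cast : Nat → Int)).zip ((ns.map (Nat.cast : Nat → Int)).drop 1)).map
        (fun ab => PySem.Str.slice txt (some ab.1) (some ab.2))) = fragsN txt.toList ns := by
  induction ns with
  | nil => simp [fragsN]
  | cons a t ih =>
    cases t with
    | nil => simp [fragsN]
    | cons b u =>
      simp only [List.map_cons, List.drop_succ_cons, List.drop_zero, List.zip_cons_cons] at ih ⊢
      rw [ih]
      simp [fragsN, PySem.Str.slice, PySem.Chars.slice_eq_listSlice, PySem.List.slice_natCast]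

-- closed form of one A-iteration: the two split tests are one boundary test
theorem stepA_eq (ws : List String) (wd : List Char) (tag sp : Bool) (c : Char) :
    stepA (ws, wd, tag, sp) c =
      ((if (!(if c == '<' then true else tag) && ((c == ' ' || c == '\t') != sp))
          then ws ++ [String.ofList wd] else ws),
       (if (!(if c == '<' then true else tag) && ((c == ' ' || c == '\t') != sp))
          then ([] : List Char) else wd) ++ [c],
       (if c == '>' then false else (if c == '<' then true else tag)),
       (c == ' ' || c == '\t')) := by
  simp only [stepA]
  cases hlt : (c == '<') <;> cases hsp : (c == ' ' || c == '\t') <;>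
    cases tag <;> cases sp <;> simp

-- closed form of one B-iteration
theorem stepB_eq (cuts : List Int) (tag sp : Bool) (i : Int) (c : Char) :
    stepB (cuts, tag, sp) (i, c) =
      ((if (!(if c == '<' then true else tag) && ((c == ' ' || c == '\t') != sp))
          then cuts ++ [i] else cuts),
       (if c == '>' then false else (if c == '<' then true else tag)),
       (c == ' ' || c == '\t')) := by
  simp only [stepB]

-- main loop invariant: simultaneous characterisation of both folds
theorem loop_inv (full : List Char) (hfull : full ≠ []) (rest : List Char) :
    ∀ (i l : Nat) (cuts0 : List Nat) (tag sp : Bool),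
    full.drop i = rest → i ≤ full.length → l ≤ i → (0 < i → l < i) →
    ∃ (ns : List Nat) (tag' sp' : Bool),
      (PySem.List.enumerate rest (i : Int)).foldl stepB
          (((cuts0 ++ [l]).map (Nat.cast : Nat → Int)), tag, sp)
        = (ns.map (Nat.cast : Nat → Int), tag', sp')
      ∧ finishA (rest.foldl stepA
          (fragsN full (cuts0 ++ [l]), (full.drop l).take (i - l), tag, sp))
        = fragsN full (ns ++ [full.length]) := by
  induction rest with
  | nil =>
    intro i l cuts0 tag sp hdrop hile hl hlt
    have hn : i = full.length := by
      have := List.drop_eq_nil_iff.mp hdrop; omega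
    have hpos : 0 < full.length := List.length_pos_of_ne_nil hfull
    have hln : l < full.length := by have := hlt (by omega); omega
    refine ⟨cuts0 ++ [l], tag, sp, by simp [PySem.List.enumerate], ?_⟩
    have hwd : (full.drop l).take (full.length - l) ≠ [] := by
      have hlen : ((full.drop l).take (full.length - l)).length = full.length - l := by
        simp [List.length_take, List.length_drop]
      intro hnil; rw [hnil] at hlen; simp at hlen; omega
    simp only [List.foldl_nil, finishA, hn]
    rw [if_pos hwd, fragsN_append]
  | cons c rest' ih =>
    intro i l cuts0 tag sp hdrop hile hl hlt
    have hifull : i < full.length := by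
      have := congrArg List.length hdrop
      simp [List.length_drop] at this; omega
    have hdrop' : full.drop (i + 1) = rest' := by
      have h1 : full.drop (i + 1) = (full.drop i).drop 1 := by
        rw [List.drop_drop]
      rw [h1, hdrop, List.drop_succ_cons, List.drop_zero]
    have hgeti : full[i]? = some c := by
      have h0 : (full.drop i)[0]? = full[i + 0]? := List.getElem?_drop
      rw [hdrop] at h0
      simpa using h0.symm
    rw [PySem.List.enumerate_cons, List.foldl_cons, List.foldl_cons, stepA_eq, stepB_eq]
    by_cases hcut : (!(if c == '<' then true else tag) && ((c == ' ' || c == '\t') != sp)) = true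
    · -- a boundary is recorded at index i
      obtain ⟨ns, tag', sp', hB, hA⟩ :=
        ih (i + 1) i (cuts0 ++ [l])
          (if c == '>' then false else (if c == '<' then true else tag))
          (c == ' ' || c == '\t') hdrop' (by omega) (by omega) (by omega)
      refine ⟨ns, tag', sp', ?_, ?_⟩
      · rw [show ((i : Int) + 1) = ((i + 1 : Nat) : Int) by push_cast; ring]
        rw [if_pos hcut,
          show (cuts0 ++ [l]).map (Nat.cast : Nat → Int) ++ [(i : Int)]
              = ((cuts0 ++ [l]) ++ [i]).map (Nat.cast : Nat → Int) by simp]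
        exact hB
      · rw [if_pos hcut, if_pos hcut]
        rw [show fragsN full (cuts0 ++ [l]) ++ [String.ofList ((full.drop l).take (i - l))]
              = fragsN full ((cuts0 ++ [l]) ++ [i]) from (fragsN_append full cuts0 l i).symm]
        rw [show ([] : List Char) ++ [c] = (full.drop i).take (i + 1 - i) by
          rw [hdrop]; simp]
        exact hA
    · -- no boundary at index i
      obtain ⟨ns, tag', sp', hB, hA⟩ :=
        ih (i + 1) l cuts0
          (if c == '>' then false else (if c == '<' then true else tag))
          (c == ' ' || c == '\t') hdrop' (by omega) (by omega) (by omega)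
      refine ⟨ns, tag', sp', ?_, ?_⟩
      · rw [show ((i : Int) + 1) = ((i + 1 : Nat) : Int) by push_cast; ring]
        rw [if_neg hcut]
        exact hB
      · rw [if_neg hcut, if_neg hcut]
        rw [show (full.drop l).take (i - l) ++ [c] = (full.drop l).take (i + 1 - l) by
          rw [show i + 1 - l = (i - l) + 1 by omega, List.take_add_one, List.getElem?_drop,
            show l + (i - l) = i by omega, hgeti]
          rfl]
        exact hA

-- ===== VERDICT (by name: the statement is the Claim_ definition above) =====
theorem getFrags_py_spec : Claim_equal_getFrags_py := by
  intro txt _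
  unfold Spec_getFrags_py getFrags_py getFrags_py_alt
  by_cases h : txt.toList = []
  · simp [h]
  · obtain ⟨ns, tag', sp', hB, hA⟩ :=
      loop_inv txt.toList h txt.toList 0 0 [] false false (by simp) (by simp) le_rfl
        (by omega)
    simp only [List.isEmpty_iff, h, if_false]
    simp only [List.nil_append, List.map_cons, List.map_nil, Nat.cast_zero] at hB
    simp only [List.nil_append, List.drop_zero,
      show fragsN txt.toList [0] = [] from rfl] at hA
    rw [hB]
    rw [show (ns.map (Nat.cast : Nat → Int)) ++ [(txt.toList.length : Int)]
          = (ns ++ [txt.toList.length]).map (Nat.cast : Nat → Int) by simp]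
    rw [zip_slice_eq_fragsN]
    simp only [finishA] at hA
    exact hA
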